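-- pv_equiv track=rewrite | github.com/eliottcassidy2000/math | 04-computation/blackself8_v3.py | find_all_involutive_anti_auts
-- ===== SOURCE A (Python) =====
-- def find_all_involutive_anti_auts(T, n):
--     """Find all involutive anti-automorphisms of T."""
--     scores = [sum(T[i][j] for j in range(n) if j != i) for i in range(n)]
--     # Anti-aut maps out-deg d to in-deg d = out-deg (n-1-d)
--     score_map = {}
--     for v, s in enumerate(scores):
--         score_map.setdefault(n - 1 - s, []).append(v)
--
--     results = []
--
--     def bt(v, perm, used):
--         if v == n:
--             if all(perm[perm[i]] == i for i in range(n)):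
--                 results.append(tuple(perm))
--             return
--         target_score = n - 1 - scores[v]
--         candidates = score_map.get(scores[v], [])  # Wait, need to think about this
--
--         # Anti-aut: T(alpha(u), alpha(v)) = T(v, u)
--         # So alpha maps vertex with score s to vertex with score (n-1-s)
--         # But wait: T^op(u,v) = T(v,u). In T^op, vertex u has out-deg = (n-1) - score_T(u).
--         # So alpha must map vertex u (score s in T) to vertex alpha(u) that has score s in T^op,
--         # i.e., score (n-1-s) in T. Wait no...
--         # Actually T(alpha(u), alpha(v)) = T(v, u) means alpha is an isomorphism from T to T^op.
--         # The out-degree of u in T is scores[u].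
--         # The out-degree of alpha(u) in T^op is scores[u] (since alpha preserves adjacency from T to T^op).
--         # Out-degree of alpha(u) in T^op = in-degree of alpha(u) in T = (n-1) - scores_T[alpha(u)].
--         # So (n-1) - scores_T[alpha(u)] = scores_T[u].
--         # => scores_T[alpha(u)] = (n-1) - scores_T[u].
--
--         target_score_val = (n - 1) - scores[v]
--         for u in range(n):
--             if u in used or scores[u] != target_score_val:
--                 continue
--             perm[v] = u
--             ok = True
--             for w in range(v):
--                 if T[u][perm[w]] != T[w][v] or T[perm[w]][u] != T[v][w]:
--                     ok = False
--                     break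
--             if ok:
--                 # Check involution constraint: if perm[u] is set, must be v
--                 if u < v and perm[u] != -1 and perm[u] != v:
--                     perm[v] = -1
--                     continue
--                 # If u == v, it's a fixed point: need T(v,v)=T(v,v), trivially OK
--                 # but for tournament: if u has fixed point, T(v,w) = T(w,v) for
--                 # another fixed point w, impossible.
--                 used.add(u)
--                 bt(v + 1, perm, used)
--                 used.remove(u)
--             perm[v] = -1
--
--     bt(0, [-1]*n, set())
--     return results
-- ===== SOURCE B (Python) =====
-- def _perms(items):
--     """All orderings of items, in the order induced by the list (lexicographic
--     when items is increasing)."""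
--     if not items:
--         return [[]]
--     return [[x] + rest
--             for i, x in enumerate(items)
--             for rest in _perms(items[:i] + items[i + 1:])]
--
--
-- def find_all_involutive_anti_auts(T, n):
--     """Find all involutive anti-automorphisms of T: flat generate-and-test over
--     all permutations of range(n)."""
--     scores = [sum(T[i][j] for j in range(n) if j != i) for i in range(n)]
--     results = []
--     for p in _perms(list(range(n))):
--         if all(p[p[i]] == i for i in range(n)) \
--            and all(scores[p[i]] == n - 1 - scores[i] for i in range(n)) \
--            and all(T[p[i]][p[j]] == T[j][i]
--                    for i in range(n) for j in range(n) if i != j):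
--             results.append(tuple(p))
--     return results
-- ===== Notes on version B (the rewrite author's own statement) =====
-- stated objective: simpler
-- what changed: Replaces the score-keyed pruned backtracking search (mutable perm array, used set, incremental pair checks, early involution pruning) by a flat generate-and-test: enumerate all permutations of range(n) in lexicographic order and keep those passing the involution, degree-compatibility and anti-automorphism filters.
import Mathlib
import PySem

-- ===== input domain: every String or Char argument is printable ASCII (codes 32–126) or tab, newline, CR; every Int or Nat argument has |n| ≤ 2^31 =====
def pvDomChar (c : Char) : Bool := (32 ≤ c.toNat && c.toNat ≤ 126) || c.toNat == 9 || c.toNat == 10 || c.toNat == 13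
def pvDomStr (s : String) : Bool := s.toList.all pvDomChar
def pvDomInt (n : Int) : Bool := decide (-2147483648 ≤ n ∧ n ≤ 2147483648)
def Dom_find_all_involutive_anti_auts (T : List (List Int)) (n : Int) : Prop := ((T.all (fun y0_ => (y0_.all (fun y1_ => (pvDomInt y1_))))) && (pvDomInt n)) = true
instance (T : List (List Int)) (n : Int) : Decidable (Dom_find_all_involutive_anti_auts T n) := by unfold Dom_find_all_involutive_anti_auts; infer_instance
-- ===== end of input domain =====

-- B replaces A's score-keyed pruned backtracking by a flat generate-and-test over all
-- permutations of range(n) (objective: simpler); same return value on every input A accepts.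

-- ===== PORT A =====
-- shared helper: the comprehension 'scores = [sum(T[i][j] for j in range(n) if j != i) for i in range(n)]'
-- (the same line occurs verbatim in both Pythons); indexing via pyGetD: exact wherever A returns.
def pyScores (T : List (List Int)) (n : Int) : List Int :=
  (PySem.List.pyRange 0 n 1).map (fun i =>
    ((PySem.List.pyRange 0 n 1).filter (fun j => !(j == i))).foldl
      (fun s j => s + PySem.List.pyGetD (PySem.List.pyGetD T i []) j 0) 0)

-- the nested function bt, with an explicit fuel (one unit per recursion level; started
-- with enough for all levels, so the fuel-out branch is never reached on Pre_ inputs).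
def btA (T : List (List Int)) (n : Int) (scores : List Int)
    (score_map : PySem.Dict Int (List Int)) :
    Nat → Int → List Int → PySem.Set Int → List (List Int) → List (List Int)
  | 0, _, _, _, results => results
  | fuel+1, v, perm, used, results =>
    if v == n then
      if (PySem.List.pyRange 0 n 1).all (fun i =>
            PySem.List.pyGetD perm (PySem.List.pyGetD perm i 0) 0 == i) then
        results ++ [perm]
      else results
    else
      let target_score := n - 1 - PySem.List.pyGetD scores v 0
      let candidates := score_map.getD (PySem.List.pyGetD scores v 0) []
      let target_score_val := n - 1 - PySem.List.pyGetD scores v 0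
      (PySem.List.pyRange 0 n 1).foldl (fun acc u =>
        if used.contains u || !(PySem.List.pyGetD scores u 0 == target_score_val) then acc
        else
          let perm' := PySem.List.pySetD perm v u
          let ok := (PySem.List.pyRange 0 v 1).all (fun w =>
            (PySem.List.pyGetD (PySem.List.pyGetD T u []) (PySem.List.pyGetD perm' w 0) 0
               == PySem.List.pyGetD (PySem.List.pyGetD T w []) v 0)
            && (PySem.List.pyGetD (PySem.List.pyGetD T (PySem.List.pyGetD perm' w 0) []) u 0
               == PySem.List.pyGetD (PySem.List.pyGetD T v []) w 0))
          if ok then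
            if decide (u < v) && !(PySem.List.pyGetD perm' u 0 == -1)
               && !(PySem.List.pyGetD perm' u 0 == v) then acc
            else btA T n scores score_map fuel (v+1) perm' (PySem.Set.add used u) acc
          else acc) results

def find_all_involutive_anti_auts (T : List (List Int)) (n : Int) : List (List Int) :=
  let scores := pyScores T n
  let score_map := (PySem.List.enumerate scores 0).foldl
      (fun d p => d.insert (n - 1 - p.2) (d.getD (n - 1 - p.2) [] ++ [p.1])) PySem.Dict.empty
  btA T n scores score_map (n.toNat + 1) 0 (List.replicate n.toNat (-1)) PySem.Set.empty []

-- ===== PORT B =====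
-- helper _perms: all orderings of items in list order ([[x]+rest for i,x in enumerate(items)
-- for rest in _perms(items[:i]+items[i+1:])]); fuel = length of items (one unit per level).
def permsB : Nat → List Int → List (List Int)
  | _, [] => [[]]
  | 0, _ :: _ => []
  | fuel+1, x :: xs =>
    (PySem.List.enumerate (x :: xs) 0).flatMap (fun q =>
      (permsB fuel (PySem.List.slice (x :: xs) none (some q.1) ++
                    PySem.List.slice (x :: xs) (some (q.1 + 1)) none)).map
        (fun rest => q.2 :: rest))

def find_all_involutive_anti_auts_alt (T : List (List Int)) (n : Int) : List (List Int) :=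
  let scores := pyScores T n
  let items := PySem.List.pyRange 0 n 1
  (permsB items.length items).foldl (fun results p =>
    if ((PySem.List.pyRange 0 n 1).all (fun i =>
          PySem.List.pyGetD p (PySem.List.pyGetD p i 0) 0 == i))
       && ((PySem.List.pyRange 0 n 1).all (fun i =>
          PySem.List.pyGetD scores (PySem.List.pyGetD p i 0) 0
            == n - 1 - PySem.List.pyGetD scores i 0))
       && ((PySem.List.pyRange 0 n 1).all (fun i =>
          ((PySem.List.pyRange 0 n 1).filter (fun j => !(i == j))).all (fun j =>
            PySem.List.pyGetD (PySem.List.pyGetD T (PySem.List.pyGetD p i 0) [])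
                (PySem.List.pyGetD p j 0) 0
              == PySem.List.pyGetD (PySem.List.pyGetD T j []) i 0)))
    then results ++ [p] else results) []

-- ===== PRECONDITION & SPEC =====
-- Pre_ = exactly the inputs where the Python A returns (elsewhere it raises IndexError):
-- n ≥ 0, and for n ≥ 2 the first n rows exist and row i reaches every column j ≠ i, j < n
-- (for n ≤ 1 the lazy score generator never touches T).
def Pre_find_all_involutive_anti_auts (T : List (List Int)) (n : Int) : Prop :=
  0 ≤ n ∧ (n ≤ 1 ∨ (n ≤ T.length ∧ ∀ i : Nat, i < n.toNat →
    (if i + 1 = n.toNat then n.toNat - 1 else n.toNat) ≤ (T.getD i []).length))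
instance (T : List (List Int)) (n : Int) : Decidable (Pre_find_all_involutive_anti_auts T n) := by
  unfold Pre_find_all_involutive_anti_auts; infer_instance

def pvWitness_find_all_involutive_anti_auts : List (List Int) × Int := ([[0, 1], [0, 0]], 2)

def Spec_find_all_involutive_anti_auts (T : List (List Int)) (n : Int) (out : List (List Int)) : Prop := out = find_all_involutive_anti_auts_alt T n
instance (T : List (List Int)) (n : Int) (out : List (List Int)) : Decidable (Spec_find_all_involutive_anti_auts T n out) := by unfold Spec_find_all_involutive_anti_auts; infer_instance

-- ===== CLAIM (what is proved, stated in full; the proofs are below) =====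
def Claim_equal_find_all_involutive_anti_auts : Prop := ∀ (T : List (List Int)) (n : Int), Dom_find_all_involutive_anti_auts T n → Pre_find_all_involutive_anti_auts T n → Spec_find_all_involutive_anti_auts T n (find_all_involutive_anti_auts T n)


-- ===== LEMMAS AND PROOFS =====

-- the full filter condition B applies to a complete permutation p (literally B's Bool)
def fullCond (T : List (List Int)) (scores : List Int) (n : Int) (p : List Int) : Bool :=
  ((PySem.List.pyRange 0 n 1).all (fun i =>
        PySem.List.pyGetD p (PySem.List.pyGetD p i 0) 0 == i))
     && ((PySem.List.pyRange 0 n 1).all (fun i =>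
        PySem.List.pyGetD scores (PySem.List.pyGetD p i 0) 0
          == n - 1 - PySem.List.pyGetD scores i 0))
     && ((PySem.List.pyRange 0 n 1).all (fun i =>
        ((PySem.List.pyRange 0 n 1).filter (fun j => !(i == j))).all (fun j =>
          PySem.List.pyGetD (PySem.List.pyGetD T (PySem.List.pyGetD p i 0) [])
              (PySem.List.pyGetD p j 0) 0
            == PySem.List.pyGetD (PySem.List.pyGetD T j []) i 0)))

-- unassigned vertices, in increasing order
def remOf (n : Int) (p : List Int) : List Int :=
  (PySem.List.pyRange 0 n 1).filter (fun u => !(p.contains u))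

-- subtree results below prefix p (what both sides produce there)
def subRes (T : List (List Int)) (scores : List Int) (n : Int) (p : List Int) : List (List Int) :=
  (permsB (remOf n p).length (remOf n p)).flatMap
    (fun ext => if fullCond T scores n (p ++ ext) then [p ++ ext] else [])

-- prefix invariant: score condition and both pairwise conditions hold on assigned positions
def PrefOK (T : List (List Int)) (scores : List Int) (n : Int) (p : List Int) : Prop :=
  (∀ i : Int, 0 ≤ i → i < (p.length : Int) →
    PySem.List.pyGetD scores (PySem.List.pyGetD p i 0) 0
      = n - 1 - PySem.List.pyGetD scores i 0) ∧
  (∀ i j : Int, 0 ≤ i → i < (p.length : Int) → 0 ≤ j → j < (p.length : Int) → i ≠ j →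
    PySem.List.pyGetD (PySem.List.pyGetD T (PySem.List.pyGetD p i 0) [])
        (PySem.List.pyGetD p j 0) 0
      = PySem.List.pyGetD (PySem.List.pyGetD T j []) i 0)

-- generic loop-shape lemmas ------------------------------------------------

theorem pvFoldlAppendIf {α : Type} (l : List α) (C : α → Bool) (acc : List α) :
    l.foldl (fun res p => if C p then res ++ [p] else res) acc
      = acc ++ l.flatMap (fun p => if C p then [p] else []) := by
  induction l generalizing acc with
  | nil => simp
  | cons x xs ih =>
      simp only [List.foldl_cons, List.flatMap_cons]
      rw [ih]
      by_cases h : C x = true <;> simp [h]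

theorem pvFlatMapCongr {α β : Type} (l : List α) (f g : α → List β)
    (h : ∀ x ∈ l, f x = g x) : l.flatMap f = l.flatMap g := by
  induction l with
  | nil => rfl
  | cons x xs ih =>
      simp only [List.flatMap_cons]
      rw [h x (by simp), ih (fun y hy => h y (by simp [hy]))]

theorem pvFlatMapFilter {α β : Type} (l : List α) (keep : α → Bool) (g : α → List β)
    (h : ∀ x ∈ l, keep x = false → g x = []) :
    l.flatMap g = (l.filter keep).flatMap g := by
  induction l with
  | nil => rfl
  | cons x xs ih =>
      by_cases hx : keep x = true
      · simp only [List.flatMap_cons, List.filter_cons, hx, if_true]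
        simpa using ih (fun y hy hk => h y (by simp [hy]) hk)
      · have hx' : keep x = false := by revert hx; cases keep x <;> simp
        simp only [List.flatMap_cons, List.filter_cons, hx', if_false, Bool.false_eq_true]
        rw [h x (by simp) hx']
        simpa using ih (fun y hy hk => h y (by simp [hy]) hk)

-- indexing lemmas -----------------------------------------------------------

theorem pvGetAppendLt (p rest : List Int) (i : Int) (h0 : 0 ≤ i) (h1 : i < (p.length : Int)) :
    PySem.List.pyGetD (p ++ rest) i 0 = PySem.List.pyGetD p i 0 := by
  have hk : i.toNat < p.length := by omega
  rw [PySem.List.pyGetD_eq_getElem _ _ h0 (by simp; omega),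
      PySem.List.pyGetD_eq_getElem _ _ h0 (by exact_mod_cast h1)]
  exact List.getElem_append_left hk

theorem pvGetAppendLen (p rest : List Int) (u : Int) :
    PySem.List.pyGetD (p ++ u :: rest) ((p.length : Nat) : Int) 0 = u := by
  rw [PySem.List.pyGetD_eq_getElem _ _ (by positivity) (by simp)]
  simp

theorem pvSetAppend (p junk : List Int) (u : Int) (hj : junk ≠ []) :
    (p ++ junk).set p.length u = p ++ u :: junk.tail := by
  induction p with
  | nil => cases junk with
    | nil => simp at hj
    | cons a l => simp
  | cons x xs ih => simp [ih]

-- permsB: one level unfolds to a flatMap over the choices -------------------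

theorem pvPermsBEnum (G : Int → List Int → List (List Int)) (l : List Int) :
    (PySem.List.enumerate l 0).flatMap (fun q =>
        G q.2 (PySem.List.slice l none (some q.1) ++ PySem.List.slice l (some (q.1 + 1)) none))
      = (List.range l.length).flatMap (fun k => G (l.getD k 0) (l.take k ++ l.drop (k + 1))) := by
  rw [PySem.List.enumerate_eq_map_pyRange l 0, List.flatMap_map]
  have hR : PySem.List.pyRange 0 (PySem.List.len l) 1
      = List.map (fun k : Nat => (k : Int)) (List.range l.length) := by
    simpa [PySem.List.len_eq] using PySem.List.pyRange_zero_nat l.length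
  rw [hR, List.flatMap_map]
  apply pvFlatMapCongr
  intro k hk
  simp only [List.mem_range] at hk
  have h1 : ((k : Int) + 1) = ((k + 1 : Nat) : Int) := by push_cast; ring
  simp only [PySem.List.pyGetD_natCast, PySem.List.slice_to_natCast, h1,
    PySem.List.slice_from_natCast]

theorem pvRangeFlatMapErase :
    ∀ (l : List Int) (G : Int → List Int → List (List Int)), l.Nodup →
      (List.range l.length).flatMap (fun k => G (l.getD k 0) (l.take k ++ l.drop (k + 1)))
        = l.flatMap (fun y => G y (l.erase y)) := by
  intro l
  induction l with
  | nil => intro G _; rfl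
  | cons x xs ih =>
      intro G hnd
      have hx : x ∉ xs := (List.nodup_cons.mp hnd).1
      rw [List.length_cons, List.range_succ_eq_map, List.flatMap_cons, List.flatMap_map]
      have h0 : G ((x :: xs).getD 0 0) ((x :: xs).take 0 ++ (x :: xs).drop 1) = G x xs := by
        simp
      have hsucc : (fun k : Nat => G ((x :: xs).getD (k + 1) 0)
          ((x :: xs).take (k + 1) ++ (x :: xs).drop (k + 1 + 1)))
          = fun k : Nat => G (xs.getD k 0) (x :: (xs.take k ++ xs.drop (k + 1))) := by
        funext k
        simp [List.take_succ_cons, List.drop_succ_cons]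
      have hstep := ih (fun y l' => G y (x :: l')) (List.nodup_cons.mp hnd).2
      rw [h0]
      calc G x xs ++ (List.range xs.length).flatMap (fun k => G ((x :: xs).getD (k+1) 0)
            ((x :: xs).take (k+1) ++ (x :: xs).drop (k+1+1)))
          = G x xs ++ (List.range xs.length).flatMap
              (fun k => G (xs.getD k 0) (x :: (xs.take k ++ xs.drop (k + 1)))) := by
            rw [hsucc]
        _ = G x xs ++ xs.flatMap (fun y => G y (x :: xs.erase y)) := by rw [hstep]
        _ = (x :: xs).flatMap (fun y => G y ((x :: xs).erase y)) := by
            rw [List.flatMap_cons, List.erase_cons_head]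
            congr 1
            apply pvFlatMapCongr
            intro y hy
            have hyx : ¬(x == y) = true := by
              simp only [beq_iff_eq]
              rintro rfl; exact hx hy
            rw [List.erase_cons_tail (by simpa using hyx)]

theorem pvPermsBErase (x : Int) (xs : List Int) (hnd : (x :: xs).Nodup) :
    permsB (x :: xs).length (x :: xs)
      = (x :: xs).flatMap (fun y => (permsB xs.length ((x :: xs).erase y)).map
          (fun rest => y :: rest)) := by
  have hlen : (x :: xs).length = xs.length + 1 := rfl
  rw [hlen]
  show (PySem.List.enumerate (x :: xs) 0).flatMap (fun q =>
      (permsB xs.length (PySem.List.slice (x :: xs) none (some q.1) ++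
                         PySem.List.slice (x :: xs) (some (q.1 + 1)) none)).map
        (fun rest => q.2 :: rest)) = _
  rw [pvPermsBEnum (fun y l' => (permsB xs.length l').map (fun rest => y :: rest)) (x :: xs)]
  exact pvRangeFlatMapErase (x :: xs)
    (fun y l' => (permsB xs.length l').map (fun rest => y :: rest)) hnd

-- remOf lemmas ---------------------------------------------------------------

theorem pvRemNil (n : Int) : remOf n ([] : List Int) = PySem.List.pyRange 0 n 1 := by
  simp [remOf]

theorem pvRemNodup (n : Int) (p : List Int) : (remOf n p).Nodup :=
  (PySem.List.nodup_pyRange_one 0 n).filter _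

theorem pvRemLength (n : Int) (p : List Int) (hnd : p.Nodup)
    (hsub : ∀ x ∈ p, x ∈ PySem.List.pyRange 0 n 1) :
    (remOf n p).length + p.length = (PySem.List.pyRange 0 n 1).length := by
  have hperm := List.filter_append_perm (fun u => !(p.contains u)) (PySem.List.pyRange 0 n 1)
  have hlen := hperm.length_eq
  rw [List.length_append] at hlen
  have hkeep : ((PySem.List.pyRange 0 n 1).filter (fun x => !!(p.contains x))).length
      = p.length := by
    have h1 : ((PySem.List.pyRange 0 n 1).filter (fun x => !!(p.contains x))).Perm p := by
      rw [List.perm_ext_iff_of_nodup ((PySem.List.nodup_pyRange_one 0 n).filter _) hnd]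
      intro a
      simp only [List.mem_filter, Bool.not_not, List.contains_iff_mem]
      exact ⟨fun h => h.2, fun h => ⟨hsub a h, h⟩⟩
    exact h1.length_eq
  rw [hkeep] at hlen
  simpa [remOf] using hlen

theorem pvRemConsErase (n : Int) (p : List Int) (u : Int) :
    remOf n (p ++ [u]) = (remOf n p).erase u := by
  rw [(pvRemNodup n p).erase_eq_filter u]
  simp only [remOf, List.filter_filter]
  apply List.filter_congr
  intro x _
  simp only [List.contains_append, List.contains_cons, List.contains_nil, Bool.or_false,
    Bool.not_or, bne]
  cases p.contains x <;> cases hxu : (x == u) <;> simp_all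

theorem pvRemNilOfFull (n : Int) (p : List Int) (hnd : p.Nodup)
    (hsub : ∀ x ∈ p, x ∈ PySem.List.pyRange 0 n 1)
    (hlen : p.length = (PySem.List.pyRange 0 n 1).length) :
    remOf n p = [] := by
  have hperm : p.Perm (PySem.List.pyRange 0 n 1) :=
    (hnd.subperm hsub).perm_of_length_le (le_of_eq hlen.symm)
  rw [remOf, List.filter_eq_nil_iff]
  intro x hx
  simp only [Bool.not_eq_true', Bool.not_eq_false, List.contains_iff_mem]
  exact hperm.mem_iff.mpr hx

-- fullCond characterization ---------------------------------------------------

theorem pvFullCondIff (T : List (List Int)) (scores : List Int) (n : Int) (q : List Int) :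
    fullCond T scores n q = true ↔
      (∀ i : Int, 0 ≤ i → i < n →
        PySem.List.pyGetD q (PySem.List.pyGetD q i 0) 0 = i) ∧
      (∀ i : Int, 0 ≤ i → i < n →
        PySem.List.pyGetD scores (PySem.List.pyGetD q i 0) 0
          = n - 1 - PySem.List.pyGetD scores i 0) ∧
      (∀ i j : Int, 0 ≤ i → i < n → 0 ≤ j → j < n → i ≠ j →
        PySem.List.pyGetD (PySem.List.pyGetD T (PySem.List.pyGetD q i 0) [])
            (PySem.List.pyGetD q j 0) 0
          = PySem.List.pyGetD (PySem.List.pyGetD T j []) i 0) := by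
  simp only [fullCond, Bool.and_eq_true, List.all_eq_true, List.mem_filter,
    PySem.List.mem_pyRange_one, beq_iff_eq, Bool.not_eq_eq_eq_not, Bool.not_true,
    and_imp, beq_eq_false_iff_ne, ne_eq]
  constructor
  · rintro ⟨⟨h1, h2⟩, h3⟩
    exact ⟨h1, h2, fun i j hi0 hin hj0 hjn hne => h3 i hi0 hin j hj0 hjn hne⟩
  · rintro ⟨h1, h2, h3⟩
    exact ⟨⟨h1, h2⟩, fun i hi0 hin j hj0 hjn hne => h3 i j hi0 hin hj0 hjn hne⟩

-- the per-candidate contribution of one iteration of A's inner loop over u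
def gFun (T : List (List Int)) (scores : List Int) (n : Int) (p junk' : List Int) (u : Int) :
    List (List Int) :=
  if p.contains u || !(PySem.List.pyGetD scores u 0
      == n - 1 - PySem.List.pyGetD scores ((p.length : Nat) : Int) 0) then []
  else
    if (PySem.List.pyRange 0 ((p.length : Nat) : Int) 1).all (fun w =>
        (PySem.List.pyGetD (PySem.List.pyGetD T u []) (PySem.List.pyGetD (p ++ u :: junk') w 0) 0
           == PySem.List.pyGetD (PySem.List.pyGetD T w []) ((p.length : Nat) : Int) 0)
        && (PySem.List.pyGetD (PySem.List.pyGetD T (PySem.List.pyGetD (p ++ u :: junk') w 0) []) u 0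
           == PySem.List.pyGetD (PySem.List.pyGetD T ((p.length : Nat) : Int) []) w 0)) then
      if decide (u < ((p.length : Nat) : Int)) && !(PySem.List.pyGetD (p ++ u :: junk') u 0 == -1)
         && !(PySem.List.pyGetD (p ++ u :: junk') u 0 == ((p.length : Nat) : Int)) then []
      else subRes T scores n (p ++ [u])
    else []

theorem pvFullFalseScore (T : List (List Int)) (scores : List Int) (n : Int)
    (p : List Int) (u : Int) (ext' : List Int) (hvlt : ((p.length : Nat) : Int) < n)
    (h : PySem.List.pyGetD scores u 0
        ≠ n - 1 - PySem.List.pyGetD scores ((p.length : Nat) : Int) 0) :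
    fullCond T scores n (p ++ u :: ext') = false := by
  apply Bool.eq_false_iff.mpr
  intro hfc
  rw [pvFullCondIff] at hfc
  have := hfc.2.1 ((p.length : Nat) : Int) (by positivity) hvlt
  rw [pvGetAppendLen] at this
  exact h this

theorem pvFullFalsePair1 (T : List (List Int)) (scores : List Int) (n : Int)
    (p : List Int) (u : Int) (ext' : List Int) (hvlt : ((p.length : Nat) : Int) < n)
    (w : Int) (h0w : 0 ≤ w) (hw : w < ((p.length : Nat) : Int))
    (h : PySem.List.pyGetD (PySem.List.pyGetD T u []) (PySem.List.pyGetD p w 0) 0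
        ≠ PySem.List.pyGetD (PySem.List.pyGetD T w []) ((p.length : Nat) : Int) 0) :
    fullCond T scores n (p ++ u :: ext') = false := by
  apply Bool.eq_false_iff.mpr
  intro hfc
  rw [pvFullCondIff] at hfc
  have := hfc.2.2 ((p.length : Nat) : Int) w (by positivity) hvlt h0w (by omega) (by omega)
  rw [pvGetAppendLen, pvGetAppendLt p (u :: ext') w h0w hw] at this
  exact h this

theorem pvFullFalsePair2 (T : List (List Int)) (scores : List Int) (n : Int)
    (p : List Int) (u : Int) (ext' : List Int) (hvlt : ((p.length : Nat) : Int) < n)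
    (w : Int) (h0w : 0 ≤ w) (hw : w < ((p.length : Nat) : Int))
    (h : PySem.List.pyGetD (PySem.List.pyGetD T (PySem.List.pyGetD p w 0) []) u 0
        ≠ PySem.List.pyGetD (PySem.List.pyGetD T ((p.length : Nat) : Int) []) w 0) :
    fullCond T scores n (p ++ u :: ext') = false := by
  apply Bool.eq_false_iff.mpr
  intro hfc
  rw [pvFullCondIff] at hfc
  have := hfc.2.2 w ((p.length : Nat) : Int) h0w (by omega) (by positivity) hvlt (by omega)
  rw [pvGetAppendLen, pvGetAppendLt p (u :: ext') w h0w hw] at this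
  exact h this

theorem pvFullFalseInv (T : List (List Int)) (scores : List Int) (n : Int)
    (p : List Int) (u : Int) (ext' : List Int) (hvlt : ((p.length : Nat) : Int) < n)
    (h0u : 0 ≤ u) (hu : u < ((p.length : Nat) : Int))
    (h : PySem.List.pyGetD p u 0 ≠ ((p.length : Nat) : Int)) :
    fullCond T scores n (p ++ u :: ext') = false := by
  apply Bool.eq_false_iff.mpr
  intro hfc
  rw [pvFullCondIff] at hfc
  have := hfc.1 ((p.length : Nat) : Int) (by positivity) hvlt
  rw [pvGetAppendLen, pvGetAppendLt p (u :: ext') u h0u hu] at this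
  exact h this

theorem pvPrefExtend (T : List (List Int)) (scores : List Int) (n : Int)
    (p junk' : List Int) (u : Int)
    (hscore : PySem.List.pyGetD scores u 0
        = n - 1 - PySem.List.pyGetD scores ((p.length : Nat) : Int) 0)
    (hok : ((PySem.List.pyRange 0 ((p.length : Nat) : Int) 1).all (fun w =>
        (PySem.List.pyGetD (PySem.List.pyGetD T u []) (PySem.List.pyGetD (p ++ u :: junk') w 0) 0
           == PySem.List.pyGetD (PySem.List.pyGetD T w []) ((p.length : Nat) : Int) 0)
        && (PySem.List.pyGetD (PySem.List.pyGetD T (PySem.List.pyGetD (p ++ u :: junk') w 0) []) u 0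
           == PySem.List.pyGetD (PySem.List.pyGetD T ((p.length : Nat) : Int) []) w 0))) = true)
    (hpref : PrefOK T scores n p) : PrefOK T scores n (p ++ [u]) := by
  rw [List.all_eq_true] at hok
  have hok' : ∀ w : Int, 0 ≤ w → w < ((p.length : Nat) : Int) →
      (PySem.List.pyGetD (PySem.List.pyGetD T u []) (PySem.List.pyGetD p w 0) 0
         = PySem.List.pyGetD (PySem.List.pyGetD T w []) ((p.length : Nat) : Int) 0)
      ∧ (PySem.List.pyGetD (PySem.List.pyGetD T (PySem.List.pyGetD p w 0) []) u 0
         = PySem.List.pyGetD (PySem.List.pyGetD T ((p.length : Nat) : Int) []) w 0) := by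
    intro w h0 h1
    have := hok w (PySem.List.mem_pyRange_one.mpr ⟨h0, h1⟩)
    rw [Bool.and_eq_true, beq_iff_eq, beq_iff_eq,
      pvGetAppendLt p (u :: junk') w h0 h1] at this
    exact this
  have hlen1 : (((p ++ [u]).length : Nat) : Int) = ((p.length : Nat) : Int) + 1 := by
    simp
  constructor
  · intro i hi0 hilt
    rw [hlen1] at hilt
    by_cases hiv : i < ((p.length : Nat) : Int)
    · rw [pvGetAppendLt p [u] i hi0 hiv]
      exact hpref.1 i hi0 hiv
    · have hieq : i = ((p.length : Nat) : Int) := by omega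
      subst hieq
      rw [show p ++ [u] = p ++ u :: [] from rfl, pvGetAppendLen]
      exact hscore
  · intro i j hi0 hilt hj0 hjlt hne
    rw [hlen1] at hilt hjlt
    by_cases hiv : i < ((p.length : Nat) : Int) <;> by_cases hjv : j < ((p.length : Nat) : Int)
    · rw [pvGetAppendLt p [u] i hi0 hiv, pvGetAppendLt p [u] j hj0 hjv]
      exact hpref.2 i j hi0 hiv hj0 hjv hne
    · have hjeq : j = ((p.length : Nat) : Int) := by omega
      subst hjeq
      rw [pvGetAppendLt p [u] i hi0 hiv,
        show p ++ [u] = p ++ u :: [] from rfl, pvGetAppendLen]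
      exact (hok' i hi0 hiv).2
    · have hieq : i = ((p.length : Nat) : Int) := by omega
      subst hieq
      rw [pvGetAppendLt p [u] j hj0 hjv,
        show p ++ [u] = p ++ u :: [] from rfl, pvGetAppendLen]
      exact (hok' j hj0 hjv).1
    · exact absurd (by omega : i = j) hne

theorem btA_master (T : List (List Int)) (n : Int) (scores : List Int)
    (score_map : PySem.Dict Int (List Int)) (hn : 0 ≤ n) :
    ∀ (fuel : Nat) (p junk : List Int) (used : PySem.Set Int) (results : List (List Int)),
      p.length + junk.length = n.toNat →
      junk.length < fuel →
      (∀ x : Int, used.contains x = p.contains x) →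
      p.Nodup → (∀ x ∈ p, x ∈ PySem.List.pyRange 0 n 1) →
      PrefOK T scores n p →
      btA T n scores score_map fuel (p.length : Int) (p ++ junk) used results
        = results ++ subRes T scores n p := by
  intro fuel
  induction fuel with
  | zero =>
      intro p junk used results hlen hfuel hused hnd hsub hpref
      omega
  | succ fuel ih =>
      intro p junk used results hlen hfuel hused hnd hsub hpref
      by_cases hfull : p.length = n.toNat
      · -- leaf level: v = n
        have hjunk : junk = [] := List.eq_nil_of_length_eq_zero (by omega)
        subst hjunk
        have hpn : ((p.length : Nat) : Int) = n := by omega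
        have hRlen : p.length = (PySem.List.pyRange 0 n 1).length := by
          rw [PySem.List.length_pyRange_one]; omega
        have hrem : remOf n p = [] := pvRemNilOfFull n p hnd hsub hRlen
        have hsc : ((PySem.List.pyRange 0 n 1).all (fun i =>
            PySem.List.pyGetD scores (PySem.List.pyGetD p i 0) 0
              == n - 1 - PySem.List.pyGetD scores i 0)) = true := by
          rw [List.all_eq_true]
          intro i hi
          rw [PySem.List.mem_pyRange_one] at hi
          simpa [beq_iff_eq] using hpref.1 i hi.1 (by omega)
        have hpr : ((PySem.List.pyRange 0 n 1).all (fun i =>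
            ((PySem.List.pyRange 0 n 1).filter (fun j => !(i == j))).all (fun j =>
              PySem.List.pyGetD (PySem.List.pyGetD T (PySem.List.pyGetD p i 0) [])
                  (PySem.List.pyGetD p j 0) 0
                == PySem.List.pyGetD (PySem.List.pyGetD T j []) i 0))) = true := by
          rw [List.all_eq_true]
          intro i hi
          rw [PySem.List.mem_pyRange_one] at hi
          rw [List.all_eq_true]
          intro j hj
          rw [List.mem_filter] at hj
          obtain ⟨hjR, hij⟩ := hj
          rw [PySem.List.mem_pyRange_one] at hjR
          have hne : i ≠ j := by simpa using hij
          simpa [beq_iff_eq] using hpref.2 i j hi.1 (by omega) hjR.1 (by omega) hne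
        have hfc : fullCond T scores n p
            = ((PySem.List.pyRange 0 n 1).all (fun i =>
                PySem.List.pyGetD p (PySem.List.pyGetD p i 0) 0 == i)) := by
          unfold fullCond
          rw [hsc, hpr, Bool.and_true, Bool.and_true]
        simp only [btA]
        rw [if_pos (by simpa [beq_iff_eq] using hpn)]
        simp only [subRes]
        rw [hrem]
        rw [show permsB ([] : List Int).length ([] : List Int) = [[]] from rfl]
        simp only [List.flatMap_cons, List.flatMap_nil, List.append_nil]
        rw [hfc]
        by_cases hinv : ((PySem.List.pyRange 0 n 1).all (fun i =>
            PySem.List.pyGetD p (PySem.List.pyGetD p i 0) 0 == i)) = true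
        · rw [if_pos hinv, if_pos hinv]
        · rw [if_neg hinv, if_neg hinv]
          simp
      · -- internal level: v < n
        obtain ⟨j0, junk', rfl⟩ : ∃ a l, junk = a :: l := by
          cases junk with
          | nil => exfalso; simp at hlen; omega
          | cons a l => exact ⟨a, l, rfl⟩
        have hvlt : ((p.length : Nat) : Int) < n := by omega
        simp only [btA]
        rw [if_neg (by simp only [beq_iff_eq]; omega)]
        have hset : ∀ u : Int, (p ++ j0 :: junk').set p.length u = p ++ u :: junk' := by
          intro u; exact pvSetAppend p (j0 :: junk') u (by simp)
        simp only [PySem.List.pySetD_natCast, hset, hused]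
        refine Eq.trans (PySem.List.foldl_congr_mem _ _
            (fun acc u => acc ++ gFun T scores n p junk' u) results ?_) ?_
        · -- each loop step appends gFun u
          intro acc u hu
          have huR := PySem.List.mem_pyRange_one.mp hu
          simp only [gFun]
          split_ifs with h1 h2 h3
          · simp
          · simp
          · -- recursive call: apply the induction hypothesis at p ++ [u]
            simp only [Bool.or_eq_true, Bool.not_eq_true', beq_eq_false_iff_ne, not_or,
              Bool.not_eq_true] at h1
            obtain ⟨hup, hscv⟩ := h1
            have hscore : PySem.List.pyGetD scores u 0
                = n - 1 - PySem.List.pyGetD scores ((p.length : Nat) : Int) 0 := by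
              simpa using hscv
            have hunotp : u ∉ p := by
              intro hmem
              have h : p.contains u = true := by
                rw [List.contains_iff_mem]; exact hmem
              rw [hup] at h
              simp at h
            have hIH := ih (p ++ [u]) junk' (PySem.Set.add used u) acc
              (by simp at hlen ⊢; omega) (by simp at hfuel ⊢; omega)
              (by
                intro x
                have hmemused : ∀ y : Int, y ∈ used ↔ y ∈ p := fun y => by
                  rw [← PySem.Set.contains_iff, hused y, List.contains_iff_mem]
                rw [Bool.eq_iff_iff, PySem.Set.contains_iff, PySem.Set.mem_add,
                  List.contains_iff_mem, hmemused, List.mem_append, List.mem_singleton])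
              (by
                rw [List.nodup_append]
                refine ⟨hnd, List.nodup_singleton u, ?_⟩
                intro a ha b hb
                rw [List.mem_singleton] at hb
                subst hb
                intro he
                exact hunotp (he ▸ ha))
              (by
                intro x hx
                rw [List.mem_append, List.mem_singleton] at hx
                rcases hx with hx | hx
                · exact hsub x hx
                · subst hx; exact hu)
              (pvPrefExtend T scores n p junk' u hscore h2 hpref)
            have e1 : (((p ++ [u]).length : Nat) : Int) = ((p.length : Nat) : Int) + 1 := by
              simp
            have e2 : (p ++ [u]) ++ junk' = p ++ u :: junk' := by simp
            rw [e1, e2] at hIH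
            exact hIH
          · simp
        · -- the flatMap of gFun over range(n) is the subtree result
          rw [PySem.List.foldl_append_eq_flatMap]
          congr 1
          rw [pvFlatMapFilter (PySem.List.pyRange 0 n 1) (fun u => !(p.contains u))
            (gFun T scores n p junk')
            (by
              intro x _ hx
              have hx' : p.contains x = true := by simpa using hx
              unfold gFun
              rw [hx']
              simp)]
          rw [show (PySem.List.pyRange 0 n 1).filter (fun u => !(p.contains u))
              = remOf n p from rfl]
          have hremlen := pvRemLength n p hnd hsub
          rw [PySem.List.length_pyRange_one] at hremlen
          have hne : remOf n p ≠ [] := by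
            intro h
            rw [h] at hremlen
            simp at hremlen
            omega
          obtain ⟨x, xs, hrem⟩ := List.exists_cons_of_ne_nil hne
          simp only [subRes]
          rw [hrem, pvPermsBErase x xs (hrem ▸ pvRemNodup n p), List.flatMap_assoc]
          apply pvFlatMapCongr
          intro u hu
          have huRem : u ∈ remOf n p := hrem ▸ hu
          have huR : u ∈ PySem.List.pyRange 0 n 1 := (List.mem_filter.mp huRem).1
          have hu01 := PySem.List.mem_pyRange_one.mp huR
          have hup0 : p.contains u = false := by
            have h := (List.mem_filter.mp huRem).2
            revert h; cases p.contains u <;> simp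
          rw [List.flatMap_map]
          simp only [gFun, hup0, Bool.false_or]
          by_cases hsc : (PySem.List.pyGetD scores u 0
              == n - 1 - PySem.List.pyGetD scores ((p.length : Nat) : Int) 0) = true
          · rw [if_neg (by rw [hsc]; simp)]
            by_cases hok : ((PySem.List.pyRange 0 ((p.length : Nat) : Int) 1).all (fun w =>
                (PySem.List.pyGetD (PySem.List.pyGetD T u [])
                    (PySem.List.pyGetD (p ++ u :: junk') w 0) 0
                   == PySem.List.pyGetD (PySem.List.pyGetD T w []) ((p.length : Nat) : Int) 0)
                && (PySem.List.pyGetD (PySem.List.pyGetD T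
                      (PySem.List.pyGetD (p ++ u :: junk') w 0) []) u 0
                   == PySem.List.pyGetD (PySem.List.pyGetD T ((p.length : Nat) : Int) [])
                      w 0))) = true
            · rw [if_pos hok]
              by_cases hprune : (decide (u < ((p.length : Nat) : Int))
                  && !(PySem.List.pyGetD (p ++ u :: junk') u 0 == -1)
                  && !(PySem.List.pyGetD (p ++ u :: junk') u 0
                      == ((p.length : Nat) : Int))) = true
              · rw [if_pos hprune]
                simp only [Bool.and_eq_true, decide_eq_true_eq, Bool.not_eq_true',
                  beq_eq_false_iff_ne] at hprune
                obtain ⟨⟨hult, _⟩, hne3⟩ := hprune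
                rw [pvGetAppendLt p (u :: junk') u hu01.1 hult] at hne3
                symm
                rw [List.flatMap_eq_nil_iff]
                intro a _
                rw [pvFullFalseInv T scores n p u a hvlt hu01.1 hult hne3]
                simp
              · rw [if_neg hprune]
                simp only [subRes]
                rw [pvRemConsErase n p u, hrem]
                have hlen2 : ((x :: xs).erase u).length = xs.length := by
                  rw [List.length_erase_of_mem (hrem ▸ huRem)]
                  simp
                rw [hlen2]
                apply pvFlatMapCongr
                intro ext _
                rw [show (p ++ [u]) ++ ext = p ++ u :: ext by simp]
            · rw [if_neg hok]
              symm
              rw [List.flatMap_eq_nil_iff]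
              intro a _
              have hok' := hok
              rw [Bool.not_eq_true, List.all_eq_false] at hok'
              obtain ⟨w, hwmem, hwfail⟩ := hok'
              have hw01 := PySem.List.mem_pyRange_one.mp hwmem
              rw [pvGetAppendLt p (u :: junk') w hw01.1 hw01.2] at hwfail
              by_cases hb1 : (PySem.List.pyGetD (PySem.List.pyGetD T u [])
                  (PySem.List.pyGetD p w 0) 0
                  == PySem.List.pyGetD (PySem.List.pyGetD T w [])
                      ((p.length : Nat) : Int) 0) = true
              · have hb2 : ¬((PySem.List.pyGetD (PySem.List.pyGetD T
                      (PySem.List.pyGetD p w 0) []) u 0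
                    == PySem.List.pyGetD (PySem.List.pyGetD T ((p.length : Nat) : Int) [])
                        w 0) = true) := by
                  intro hb2
                  exact hwfail (by rw [Bool.and_eq_true]; exact ⟨hb1, hb2⟩)
                have hvne : PySem.List.pyGetD (PySem.List.pyGetD T
                      (PySem.List.pyGetD p w 0) []) u 0
                    ≠ PySem.List.pyGetD (PySem.List.pyGetD T ((p.length : Nat) : Int) [])
                        w 0 := by
                  simpa [beq_iff_eq] using hb2
                rw [pvFullFalsePair2 T scores n p u a hvlt w hw01.1 hw01.2 hvne]
                simp
              · have hvne : PySem.List.pyGetD (PySem.List.pyGetD T u [])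
                    (PySem.List.pyGetD p w 0) 0
                    ≠ PySem.List.pyGetD (PySem.List.pyGetD T w [])
                        ((p.length : Nat) : Int) 0 := by
                  simpa [beq_iff_eq] using hb1
                rw [pvFullFalsePair1 T scores n p u a hvlt w hw01.1 hw01.2 hvne]
                simp
          · rw [if_pos (by rw [Bool.eq_false_iff.mpr hsc]; rfl)]
            symm
            rw [List.flatMap_eq_nil_iff]
            intro a _
            have hneq : PySem.List.pyGetD scores u 0
                ≠ n - 1 - PySem.List.pyGetD scores ((p.length : Nat) : Int) 0 := by
              simpa [beq_iff_eq] using hsc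
            rw [pvFullFalseScore T scores n p u a hvlt hneq]
            simp

-- ===== VERDICT (by name: the statement is the Claim_ definition above) =====

theorem find_all_involutive_anti_auts_spec : Claim_equal_find_all_involutive_anti_auts := by
  unfold Claim_equal_find_all_involutive_anti_auts
  intro T n hdom hpre
  unfold Spec_find_all_involutive_anti_auts
  have hn : 0 ≤ n := hpre.1
  have hA : find_all_involutive_anti_auts T n = subRes T (pyScores T n) n [] := by
    have hM := btA_master T n (pyScores T n)
      ((PySem.List.enumerate (pyScores T n) 0).foldl
        (fun d q => d.insert (n - 1 - q.2) (d.getD (n - 1 - q.2) [] ++ [q.1]))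
        PySem.Dict.empty)
      hn (n.toNat + 1) [] (List.replicate n.toNat (-1)) PySem.Set.empty []
      (by simp) (by simp) (by intro x; rfl) List.nodup_nil (by intro x hx; simp at hx)
      ⟨by intro i h0 h1; simp at h1; omega,
       by
        intro i j h0 h1
        simp at h1
        exact absurd h1 (by omega)⟩
    simp only [find_all_involutive_anti_auts]
    simpa using hM
  have hB : find_all_involutive_anti_auts_alt T n
      = (permsB (PySem.List.pyRange 0 n 1).length (PySem.List.pyRange 0 n 1)).flatMap
          (fun p => if fullCond T (pyScores T n) n p then [p] else []) := by
    show (permsB (PySem.List.pyRange 0 n 1).length (PySem.List.pyRange 0 n 1)).foldl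
        (fun results p => if fullCond T (pyScores T n) n p then results ++ [p] else results) []
      = _
    rw [pvFoldlAppendIf, List.nil_append]
  rw [hA, hB]
  unfold subRes
  rw [pvRemNil]
  simp only [List.nil_append]
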